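-- pv_equiv track=rewrite | github.com/muskan-1234/python3-Python-Functions-Files-and-Dictionaries | python_Functions_Files_Dictionaries_Assessment6.py | stop_at_z
-- ===== SOURCE A (Python) =====
-- def stop_at_z(list):
--     index=0
--     sub=[]
--     while index<len(list):
--         if list[index]!='z':
--             sub.append(list[index])
--
--         else:
--             break
--         index+=1
--
--     return sub
-- ===== SOURCE B (Python) =====
-- def stop_at_z(list):
--     try:
--         i = list.index('z')
--     except ValueError:
--         return list[:]
--     return list[:i]
-- ===== Notes on version B (the rewrite author's own statement) =====
-- stated objective: simpler
-- what changed: Instead of an index loop appending element-by-element until 'z', B locates the cutoff with list.index('z') (catching ValueError when absent) and returns the prefix slice list[:i].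
import Mathlib
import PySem

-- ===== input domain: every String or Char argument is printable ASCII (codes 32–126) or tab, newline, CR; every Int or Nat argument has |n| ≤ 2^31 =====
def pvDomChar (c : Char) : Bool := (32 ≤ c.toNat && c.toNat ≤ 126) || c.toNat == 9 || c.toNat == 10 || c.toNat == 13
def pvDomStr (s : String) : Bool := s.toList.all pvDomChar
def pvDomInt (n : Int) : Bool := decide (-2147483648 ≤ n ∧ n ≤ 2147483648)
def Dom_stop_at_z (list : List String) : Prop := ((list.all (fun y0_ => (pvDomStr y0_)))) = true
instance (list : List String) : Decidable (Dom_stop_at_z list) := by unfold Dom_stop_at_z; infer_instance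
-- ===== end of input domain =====

-- B replaces A's incremental append loop by finding the cutoff with list.index('z') and returning the prefix slice; same return value.
-- ===== PORT A =====
-- while index < len(list): if list[index] != 'z': sub.append(...) else: break; index += 1
def stopAtZLoop (l : List String) (index : Nat) (sub : List String) : List String :=
  if h : index < l.length then
    if l[index] ≠ "z" then
      stopAtZLoop l (index + 1) (sub ++ [l[index]])
    else sub
  else sub
termination_by l.length - index

def stop_at_z (list : List String) : List String :=
  stopAtZLoop list 0 []

-- ===== PORT B =====
-- try: i = list.index('z') except ValueError: return list[:]; return list[:i]
def stop_at_z_alt (list : List String) : List String :=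
  match PySem.List.index? list "z" with
  | some i => PySem.List.slice list none (some (i : Int))
  | none => PySem.List.slice list none none

-- ===== PRECONDITION & SPEC =====
def Spec_stop_at_z (list : List String) (out : List String) : Prop := out = stop_at_z_alt list
instance (list : List String) (out : List String) : Decidable (Spec_stop_at_z list out) := by unfold Spec_stop_at_z; infer_instance

-- ===== CLAIM (what is proved, stated in full; the proofs are below) =====
def Claim_equal_stop_at_z : Prop := ∀ (list : List String), Dom_stop_at_z list → Spec_stop_at_z list (stop_at_z list)

-- ===== LEMMAS AND PROOFS =====
lemma stopAtZLoop_eq (l : List String) (index : Nat) (sub : List String) :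
    stopAtZLoop l index sub = sub ++ (l.drop index).takeWhile (fun x => x ≠ "z") := by
  induction h : l.length - index generalizing index sub with
  | zero =>
    rw [stopAtZLoop]
    have : ¬ index < l.length := by omega
    simp [this, List.drop_eq_nil_of_le (Nat.le_of_not_lt this)]
  | succ n ih =>
    rw [stopAtZLoop]
    have hlt : index < l.length := by omega
    have hdrop : l.drop index = l[index] :: l.drop (index + 1) :=
      List.drop_eq_getElem_cons hlt
    by_cases hz : l[index] = "z"
    · simp [hlt, hz, hdrop]
    · simp only [hlt, dif_pos, hz, ne_eq, not_false_eq_true, if_pos]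
      rw [ih (index + 1) _ (by omega), hdrop, List.takeWhile_cons]
      simp [hz]

lemma takeWhile_pre (pre suf : List String) (h : "z" ∉ pre) :
    (pre ++ "z" :: suf).takeWhile (fun x => x ≠ "z") = pre := by
  induction pre with
  | nil => simp
  | cons a t ih =>
    simp only [List.mem_cons, not_or] at h
    have ha : ¬ a = "z" := fun hc => h.1 hc.symm
    simpa [List.takeWhile_cons, ha] using ih h.2

-- ===== VERDICT (by name: the statement is the Claim_ definition above) =====
theorem stop_at_z_spec : Claim_equal_stop_at_z := by
  intro l _
  unfold Spec_stop_at_z stop_at_z stop_at_z_alt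
  rw [stopAtZLoop_eq]
  cases hidx : PySem.List.index? l "z" with
  | none =>
    dsimp only
    have hz : "z" ∉ l := (PySem.List.index?_eq_none_iff l "z").mp hidx
    rw [PySem.List.slice_none_none]
    simp
    intro x hx hc
    exact hz (hc ▸ hx)
  | some i =>
    dsimp only
    obtain ⟨pre, suf, hl, hlen, hzpre⟩ := (PySem.List.index?_eq_some_iff l "z" i).mp hidx
    subst hl
    rw [PySem.List.slice_to_natCast, ← hlen, List.take_left]
    simpa using takeWhile_pre pre suf hzpre
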